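-- pv_equiv track=rewrite | github.com/srujrs/vnit_assignments | CN/CNs21_Assign3_BT18CSE041/server4.py | getActualMsg
-- ===== SOURCE A (Python) =====
-- def getActualMsg(msg):
--     num = len(msg)
--     extra = len(str(num))
--     power = 1
--
--     while 10**power < num:
--         power += 1
--     if 10**power == num:
--         return extra - 1
--     else:
--         return extra
-- ===== SOURCE B (Python) =====
-- def getActualMsg(msg):
--     num = len(msg)
--     if num == 0:
--         return 1
--     return len(str(num - 1))
-- ===== Notes on version B (the rewrite author's own statement) =====
-- stated objective: simpler
-- what changed: Replaces the power-of-10 search loop and the exact-power correction with the closed form len(str(num-1)) -- the digit count of num-1, which is exactly A's result -- keeping 1 for the empty message.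
import Mathlib
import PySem

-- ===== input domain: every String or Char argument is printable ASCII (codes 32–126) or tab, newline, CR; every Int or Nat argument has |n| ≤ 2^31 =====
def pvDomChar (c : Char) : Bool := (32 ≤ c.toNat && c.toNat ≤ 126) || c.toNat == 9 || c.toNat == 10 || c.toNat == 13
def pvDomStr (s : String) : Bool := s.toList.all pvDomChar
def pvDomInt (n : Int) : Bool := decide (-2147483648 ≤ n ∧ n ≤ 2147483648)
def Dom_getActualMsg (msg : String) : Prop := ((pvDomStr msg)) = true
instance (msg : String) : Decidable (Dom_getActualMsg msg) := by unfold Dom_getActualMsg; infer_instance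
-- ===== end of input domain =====

-- B replaces A's power-of-10 search loop and exact-power correction by the closed form
-- len(str(num-1)) (with 1 for the empty message); objective: simpler.


-- ===== PORT A =====
-- the 'while 10**power < num: power += 1' loop of A, returning the final power
def pvLoopA (num : Int) (power : Nat) : Nat :=
  if (10:Int) ^ power < num then pvLoopA num (power + 1) else power
termination_by (num.toNat + 1) - 10 ^ power
decreasing_by
  have h1 : (10:Nat) ^ power < 10 ^ (power + 1) :=
    Nat.pow_lt_pow_right (by omega) (by omega)
  have h2 : (10:Nat) ^ power < num.toNat := by
    have : ((10:Nat) ^ power : Int) < num := by push_cast; omega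
    omega
  omega

def getActualMsg (msg : String) : Int :=
  let num : Int := PySem.Str.len msg
  let extra : Int := (PySem.Int.toChars num).length
  let power : Nat := pvLoopA num 1
  if (10:Int) ^ power = num then extra - 1 else extra

-- ===== PORT B =====
def getActualMsg_alt (msg : String) : Int :=
  let num : Int := PySem.Str.len msg
  if num = 0 then 1 else ((PySem.Int.toChars (num - 1)).length : Int)

-- ===== PRECONDITION & SPEC =====
def Spec_getActualMsg (msg : String) (out : Int) : Prop := out = getActualMsg_alt msg
instance (msg : String) (out : Int) : Decidable (Spec_getActualMsg msg out) := by unfold Spec_getActualMsg; infer_instance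

-- ===== CLAIM (what is proved, stated in full; the proofs are below) =====
def Claim_equal_getActualMsg : Prop := ∀ (msg : String), Dom_getActualMsg msg → Spec_getActualMsg msg (getActualMsg msg)

-- ===== LEMMAS AND PROOFS =====

-- digit count of a Nat, as A's str() produces it
lemma pv_toChars_natCast (n : Nat) : PySem.Int.toChars ((n : Nat) : Int) = Nat.toDigits 10 n := by
  simp [PySem.Int.toChars]

-- loop spec: result ≥ start, num ≤ 10^result, and every power in [start, result) is < num
lemma pvLoopA_spec (num : Int) (p : Nat) :
    p ≤ pvLoopA num p ∧ num ≤ (10:Int) ^ (pvLoopA num p) ∧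
      ∀ q, p ≤ q → q < pvLoopA num p → (10:Int) ^ q < num := by
  fun_induction pvLoopA num p with
  | case1 p h ih =>
    refine ⟨by omega, ih.2.1, ?_⟩
    intro q hq1 hq2
    rcases Nat.eq_or_lt_of_le hq1 with rfl | hlt
    · exact h
    · exact ih.2.2 q (by omega) hq2
  | case2 p h => exact ⟨le_refl _, by omega, fun q h1 h2 => by omega⟩

-- exact digit-count bracket: (Nat.toDigits 10 n).length = k ↔ n < 10^k and (k=1 or 10^(k-1) ≤ n)
lemma pv_len_toDigits_lt (n k : Nat) (hk : 0 < k) :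
    (Nat.toDigits 10 n).length ≤ k ↔ n < 10 ^ k :=
  Nat.length_toDigits_le_iff (by omega) hk

theorem getActualMsg_spec_aux (msg : String) : getActualMsg msg = getActualMsg_alt msg := by
  unfold getActualMsg getActualMsg_alt
  rw [PySem.Str.len_eq]
  dsimp only
  generalize msg.toList.length = n
  rw [pv_toChars_natCast]
  by_cases h0 : n = 0
  · subst h0
    simp
  · -- n ≥ 1
    have hn1 : 1 ≤ n := Nat.one_le_iff_ne_zero.mpr h0
    have hsub : ((n:Int) - 1) = ((n - 1 : Nat) : Int) := by omega
    rw [hsub, pv_toChars_natCast]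
    have hne : ¬ ((n:Int) = 0) := by exact_mod_cast h0
    simp only [if_neg hne]
    set P := pvLoopA ((n:Nat):Int) 1 with hP
    obtain ⟨hP1, hPub, hPmin⟩ := pvLoopA_spec ((n:Nat):Int) 1
    -- translate loop facts to Nat
    have hPubN : n ≤ 10 ^ P := by exact_mod_cast hPub
    have hPminN : ∀ q, 1 ≤ q → q < P → 10 ^ q < n := by
      intro q h1 h2
      have := hPmin q h1 h2
      exact_mod_cast this
    by_cases hpow : (10:Int) ^ P = (n : Int)
    · -- n is exactly 10^P, P ≥ 1 : A returns (len n) - 1, B returns len (n-1); both = P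
      have hpowN : 10 ^ P = n := by exact_mod_cast hpow
      simp only [if_pos hpow]
      have hlen_n : (Nat.toDigits 10 n).length = P + 1 := by
        have hub : (Nat.toDigits 10 n).length ≤ P + 1 := by
          rw [pv_len_toDigits_lt n (P+1) (by omega)]
          calc n = 10 ^ P := hpowN.symm
          _ < 10 ^ (P + 1) := Nat.pow_lt_pow_right (by omega) (by omega)
        have hlb : ¬ ((Nat.toDigits 10 n).length ≤ P) := by
          rw [pv_len_toDigits_lt n P (by omega)]
          omega
        omega
      have hlen_pred : (Nat.toDigits 10 (n - 1)).length = P := by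
        have hub : (Nat.toDigits 10 (n-1)).length ≤ P := by
          rw [pv_len_toDigits_lt (n-1) P (by omega)]
          omega
        have := @Nat.length_toDigits_pos 10 (n-1)
        rcases Nat.eq_or_lt_of_le hP1 with h1 | h1
        · omega
        · have hlb : ¬ ((Nat.toDigits 10 (n-1)).length ≤ P - 1) := by
            rw [pv_len_toDigits_lt (n-1) (P-1) (by omega)]
            have : 10 ^ (P - 1) < 10 ^ P := Nat.pow_lt_pow_right (by omega) (by omega)
            omega
          omega
      rw [hlen_n, hlen_pred]
      push_cast; ring
    · -- n is not an exact power reached by the loop: A returns len n; show len n = len (n-1)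
      simp only [if_neg hpow]
      have hpowN : ¬ (10 ^ P = n) := fun h => hpow (by exact_mod_cast h)
      have hnlt : n < 10 ^ P := by omega
      set d := (Nat.toDigits 10 n).length with hd
      have hd1 : 0 < d := @Nat.length_toDigits_pos 10 n
      have hdub : n < 10 ^ d := by
        have := (pv_len_toDigits_lt n d hd1).mp (le_refl d)
        exact this
      have hpred_ub : (Nat.toDigits 10 (n-1)).length ≤ d := by
        rw [pv_len_toDigits_lt (n-1) d hd1]; omega
      have hpred_lb : ¬ ((Nat.toDigits 10 (n-1)).length ≤ d - 1) := by
        rcases Nat.eq_or_lt_of_le hd1 with h1 | h1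
        · have := @Nat.length_toDigits_pos 10 (n-1)
          omega
        · -- d ≥ 2 : n ≥ 10^(d-1), and n ≠ 10^(d-1) since the loop would have stopped there
          rw [pv_len_toDigits_lt (n-1) (d-1) (by omega)]
          have hdlb : ¬ (n < 10 ^ (d - 1)) := by
            intro hc
            have : d ≤ d - 1 := by
              rw [hd, pv_len_toDigits_lt n (d-1) (by omega)]; exact hc
            omega
          -- n ≠ 10^(d-1): if so, the loop's minimality forces P = d-1, contradicting hpowN/hnlt
          have hne10 : n ≠ 10 ^ (d - 1) := by
            intro hc
            by_cases hPd : P ≤ d - 1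
            · rcases Nat.eq_or_lt_of_le hPd with h2 | h2
              · exact hpowN (by rw [h2, ← hc])
              · have h3 : (10:Nat) ^ (d-1) ≤ 10 ^ P := by omega
                have := (Nat.pow_le_pow_iff_right (a := 10) (by omega)).mp h3
                omega
            · have := hPminN (d-1) (by omega) (by omega)
              omega
          omega
      have : (Nat.toDigits 10 (n-1)).length = d := by omega
      rw [this]

-- ===== VERDICT (by name: the statement is the Claim_ definition above) =====
theorem getActualMsg_spec : Claim_equal_getActualMsg := by
  intro msg _
  exact getActualMsg_spec_aux msg
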